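-- pv_equiv track=rewrite | github.com/mikedotexe/reptends | bridge_reptends/visibility.py | _power_exponent
-- ===== SOURCE A (Python) =====
-- def _power_exponent(base: int, value: int) -> int | None:
--     if value <= 0:
--         return None
--     if base == 1:
--         return 0 if value == 1 else None
--     if base <= 0:
--         return None
--     exponent = 0
--     current = value
--     while current > 1 and current % base == 0:
--         current //= base
--         exponent += 1
--     return exponent if current == 1 else None
-- ===== SOURCE B (Python) =====
-- def _power_exponent(base: int, value: int) -> int | None:
--     if value <= 0:
--         return None
--     if base == 1:
--         return 0 if value == 1 else None
--     if base <= 0: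
--         return None
--     # any exponent e with base**e == value satisfies e <= log2(value) < value.bit_length()
--     for e in range(value.bit_length() + 1):
--         if base ** e == value:
--             return e
--     return None
-- ===== Notes on version B (the rewrite author's own statement) =====
-- stated objective: alternative
-- what changed: Replaces A's divide-down factoring loop (repeated //= and % divisibility checks) with a bounded search: scan e in range(value.bit_length()+1) and return the first e with base**e == value.
import Mathlib
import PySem

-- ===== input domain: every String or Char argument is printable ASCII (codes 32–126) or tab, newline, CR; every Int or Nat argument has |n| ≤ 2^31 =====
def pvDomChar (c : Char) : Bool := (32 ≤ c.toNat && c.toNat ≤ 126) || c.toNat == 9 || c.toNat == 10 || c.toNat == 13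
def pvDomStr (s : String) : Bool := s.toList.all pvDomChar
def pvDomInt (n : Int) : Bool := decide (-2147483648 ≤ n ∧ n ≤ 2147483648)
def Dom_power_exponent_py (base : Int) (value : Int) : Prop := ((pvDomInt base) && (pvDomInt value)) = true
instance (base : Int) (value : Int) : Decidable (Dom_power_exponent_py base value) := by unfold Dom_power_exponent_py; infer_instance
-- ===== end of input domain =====

-- B replaces A's divide-down factoring loop with a bounded scan over candidate exponents (first e with base^e = value); alternative decomposition.


-- ===== PORT A =====
-- A's while loop: divide current by base while current > 1 and current % base == 0.
-- fuel is a totality guard only; current strictly decreases each step, so fuel = value.toNat never runs out.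
def pvALoop (base current exponent : Int) : Nat → Option Int
  | 0 => none
  | fuel + 1 =>
    if 1 < current ∧ PySem.Int.mod current base = 0 then
      pvALoop base (PySem.Int.floordiv current base) (exponent + 1) fuel
    else if current = 1 then some exponent else none

def power_exponent_py (base : Int) (value : Int) : Option Int :=
  if value ≤ 0 then none
  else if base = 1 then (if value = 1 then some 0 else none)
  else if base ≤ 0 then none
  else pvALoop base value 0 value.toNat

-- ===== PORT B =====
-- B's for-loop with early return: try each candidate exponent e and return the first with base ** e == value.
def pvBScan (base value : Int) : List Nat → Option Int
  | [] => none
  | e :: rest => if base ^ e = value then some (e : Int) else pvBScan base value rest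

-- value.bit_length() for value > 0 is exactly Nat.log2 value.toNat + 1 (hand-ported; exact on value > 0,
-- the only place B evaluates it); range(bl + 1) = List.range (Nat.log2 value.toNat + 2).
def power_exponent_py_alt (base : Int) (value : Int) : Option Int :=
  if value ≤ 0 then none
  else if base = 1 then (if value = 1 then some 0 else none)
  else if base ≤ 0 then none
  else pvBScan base value (List.range (Nat.log2 value.toNat + 2))

-- ===== PRECONDITION & SPEC =====
def Spec_power_exponent_py (base : Int) (value : Int) (out : Option Int) : Prop := out = power_exponent_py_alt base value
instance (base : Int) (value : Int) (out : Option Int) : Decidable (Spec_power_exponent_py base value out) := by unfold Spec_power_exponent_py; infer_instance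

-- ===== CLAIM (what is proved, stated in full; the proofs are below) =====
def Claim_equal_power_exponent_py : Prop := ∀ (base : Int) (value : Int), Dom_power_exponent_py base value → Spec_power_exponent_py base value (power_exponent_py base value)

-- ===== LEMMAS AND PROOFS =====

theorem pv_pow_inj (base : Int) (hb : 2 ≤ base) {j k : Nat} (h : base ^ j = base ^ k) : j = k := by
  rcases Nat.lt_trichotomy j k with hlt | he | hgt
  · exact absurd h (ne_of_lt (pow_lt_pow_right₀ (by omega) hlt))
  · exact he
  · exact absurd h.symm (ne_of_lt (pow_lt_pow_right₀ (by omega) hgt))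

theorem pvALoop_some (base : Int) (hb : 2 ≤ base) :
    ∀ (fuel : Nat) (k : Nat) (exponent : Int), (base ^ k).toNat ≤ fuel →
      pvALoop base (base ^ k) exponent fuel = some (exponent + k) := by
  intro fuel
  induction fuel with
  | zero =>
      intro k exponent hf
      exfalso
      have h1 : (1 : Int) ≤ base ^ k := one_le_pow₀ (by omega) (n := k)
      omega
  | succ n ih =>
      intro k exponent hf
      cases k with
      | zero =>
          simp [pvALoop]
      | succ m =>
          have hpow : (1 : Int) ≤ base ^ m := one_le_pow₀ (by omega) (n := m)
          have hgt : 1 < base ^ (m + 1) := by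
            have : base ^ (m+1) = base ^ m * base := pow_succ base m
            nlinarith
          have hdvd : base ∣ base ^ (m + 1) := dvd_pow_self base (Nat.succ_ne_zero m)
          have hmod : PySem.Int.mod (base ^ (m+1)) base = 0 :=
            (PySem.Int.mod_eq_zero_iff_dvd _ _).mpr hdvd
          have hdiv : PySem.Int.floordiv (base ^ (m+1)) base = base ^ m := by
            rw [PySem.Int.floordiv_eq_iff_of_pos (by omega)]
            constructor
            · rw [pow_succ]
            · rw [pow_succ]; nlinarith
          rw [pvALoop, if_pos ⟨hgt, hmod⟩, hdiv]
          have hlt : base ^ m < base ^ (m+1) := by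
            rw [pow_succ]; nlinarith
          have := ih m (exponent + 1) (by omega)
          rw [this]
          push_cast
          ring_nf

theorem pvALoop_none (base : Int) (hb : 2 ≤ base) :
    ∀ (fuel : Nat) (current exponent : Int), 1 ≤ current → current.toNat ≤ fuel →
      (∀ k : Nat, current ≠ base ^ k) →
      pvALoop base current exponent fuel = none := by
  intro fuel
  induction fuel with
  | zero => intro current exponent h1 hf _; omega
  | succ n ih =>
      intro current exponent h1 hf hnp
      rw [pvALoop]
      by_cases hc : 1 < current ∧ PySem.Int.mod current base = 0
      · rw [if_pos hc]
        obtain ⟨hgt, hmod⟩ := hc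
        have hdvd : base ∣ current := (PySem.Int.mod_eq_zero_iff_dvd _ _).mp hmod
        obtain ⟨c, hcq⟩ := hdvd
        have hc1 : 1 ≤ c := by nlinarith
        have hdiv : PySem.Int.floordiv current base = c := by
          rw [PySem.Int.floordiv_eq_iff_of_pos (by omega)]
          constructor
          · nlinarith
          · nlinarith
        rw [hdiv]
        apply ih c (exponent + 1) hc1
        · have : c < current := by nlinarith
          omega
        · intro k hk
          exact hnp (k + 1) (by rw [hcq, hk, pow_succ, mul_comm])
      · rw [if_neg hc, if_neg]
        intro h
        exact hnp 0 (by simpa using h)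

theorem pvBScan_none (base value : Int) :
    ∀ l : List Nat, (∀ j : Nat, base ^ j ≠ value) → pvBScan base value l = none := by
  intro l hnp
  induction l with
  | nil => rfl
  | cons e rest ih => simp [pvBScan, hnp e, ih]

theorem pvBScan_some (base value : Int) (hb : 2 ≤ base) (k : Nat) (hk : base ^ k = value) :
    ∀ l : List Nat, k ∈ l → pvBScan base value l = some (k : Int) := by
  intro l
  induction l with
  | nil => intro h; cases h
  | cons e rest ih =>
      intro hmem
      by_cases he : base ^ e = value
      · have hek : e = k := pv_pow_inj base hb (by rw [he, hk])
        rw [pvBScan, if_pos he, hek]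
      · have hke : k ≠ e := fun h => he (h ▸ hk)
        have : k ∈ rest := by
          rcases List.mem_cons.mp hmem with h | h
          · exact absurd h hke
          · exact h
        simp [pvBScan, he, ih this]

-- ===== VERDICT (by name: the statement is the Claim_ definition above) =====
theorem power_exponent_py_spec : Claim_equal_power_exponent_py := by
  intro base value _
  unfold Spec_power_exponent_py power_exponent_py power_exponent_py_alt
  by_cases hv : value ≤ 0
  · simp [hv]
  rw [if_neg hv, if_neg hv]
  by_cases hb1 : base = 1
  · simp [hb1]
  rw [if_neg hb1, if_neg hb1]
  by_cases hb0 : base ≤ 0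
  · simp [hb0]
  rw [if_neg hb0, if_neg hb0]
  have hb : 2 ≤ base := by omega
  have hv1 : 1 ≤ value := by omega
  by_cases hp : ∃ k : Nat, value = base ^ k
  · obtain ⟨k, hk⟩ := hp
    have hA : pvALoop base value 0 value.toNat = some (0 + k) := by
      rw [hk]
      exact pvALoop_some base hb _ k 0 (by omega)
    have hbound : k < Nat.log2 value.toNat + 2 := by
      have h2k : (2 : Int) ^ k ≤ base ^ k := pow_le_pow_left₀ (by omega) hb k
      have h2k' : ((2 ^ k : Nat) : Int) ≤ value := by push_cast; omega
      have hle : 2 ^ k ≤ value.toNat := by omega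
      have hne : value.toNat ≠ 0 := by omega
      have : k ≤ Nat.log 2 value.toNat := (Nat.le_log_iff_pow_le (by omega) hne).mpr hle
      rw [Nat.log2_eq_log_two]
      omega
    have hB : pvBScan base value (List.range (Nat.log2 value.toNat + 2)) = some (k : Int) :=
      pvBScan_some base value hb k hk.symm _ (List.mem_range.mpr hbound)
    rw [hA, hB]
    simp
  · push Not at hp
    rw [pvALoop_none base hb _ value 0 hv1 (by omega) hp,
        pvBScan_none base value _ (fun j hj => hp j hj.symm)]
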